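-- pv_equiv track=rewrite | github.com/Saima-Chaity/Leetcode | OA/Optimizing Box Weights.py | optimizing_box_weights
-- ===== SOURCE A (Python) =====
-- from collections import Counter
-- import heapq
--
-- def optimizing_box_weights(arr: [int]) -> [int]:
--     # WRITE YOUR BRILLIANT CODE HERE
--
--     totalSum = sum(arr)
--     heap = []
--     for index, num in enumerate(arr):
--         heapq.heappush(heap, (-num, index))
--
--     a = []
--     b = []
--     sumOfA = 0
--     removedIndex = []
--     while heap and sumOfA < totalSum:
--         num, index = heapq.heappop(heap)
--         num = abs(num)
--         totalSum -= num
--         a.append(num)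
--         sumOfA += num
--         removedIndex.append(index)
--
--     for i in range(len(arr)):
--         if i not in removedIndex:
--             b.append(arr[i])
--
--     isUnion = False
--     isIntersection = False
--     mapping = Counter(b)
--     for item in a:
--         if item in mapping:
--             isIntersection = True
--             break
--
--     newArr = a + b
--     if Counter(newArr) == Counter(arr):
--         isUnion = True
--
--     return a if isUnion and not isIntersection else []
-- ===== SOURCE B (Python) =====
-- def optimizing_box_weights(arr):
--     # Sort descending once, take the minimal prefix whose sum >= sum of the rest,
--     # and reject via an O(1) duplicate check at the boundary.
--     s = sorted(arr, reverse=True)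
--     total = sum(s)
--     pref = 0
--     k = 0
--     for v in s:
--         if pref >= total - pref:
--             break
--         pref += v
--         k += 1
--     if 0 < k < len(s) and s[k - 1] == s[k]:
--         return []
--     return s[:k]
-- ===== Notes on version B (the rewrite author's own statement) =====
-- stated objective: faster
-- what changed: Replaces A's heap-pop selection loop, the quadratic 'i not in removedIndex' rebuild of the remainder and the Counter-based union/intersection re-checks by a single descending sort, a prefix-sum scan to find the split point, and an O(1) duplicate comparison at the split boundary.
import Mathlib
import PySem

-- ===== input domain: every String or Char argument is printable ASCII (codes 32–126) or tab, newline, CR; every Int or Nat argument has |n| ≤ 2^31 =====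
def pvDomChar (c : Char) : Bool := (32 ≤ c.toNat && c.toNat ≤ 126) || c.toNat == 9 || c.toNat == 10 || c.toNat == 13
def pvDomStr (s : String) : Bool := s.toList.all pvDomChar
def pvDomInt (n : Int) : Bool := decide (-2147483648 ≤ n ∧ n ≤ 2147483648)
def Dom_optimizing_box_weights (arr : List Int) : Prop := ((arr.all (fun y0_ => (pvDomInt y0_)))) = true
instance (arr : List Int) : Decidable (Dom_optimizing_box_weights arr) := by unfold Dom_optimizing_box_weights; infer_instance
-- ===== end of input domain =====

-- B replaces A's heap-pop selection loop and its quadratic `i not in removedIndex` /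
-- Counter re-checks by one descending sort, a prefix-sum scan and an O(1)
-- duplicate check at the boundary (objective: faster).

-- ===== PORT A =====
-- heapq is ported by its contract: the heap holds the multiset of pushed pairs
-- (kept as a list in push order); heappop removes the lexicographically least pair.
def obwPairLe (p q : Int × Int) : Bool := p.1 < q.1 || (p.1 == q.1 && p.2 ≤ q.2)

-- heappop: returns the least pair and the heap with that one occurrence removed.
def obwPopMin : List (Int × Int) → Option ((Int × Int) × List (Int × Int))
  | [] => none
  | p :: t =>
    match obwPopMin t with
    | none => some (p, [])
    | some (m, r) => if obwPairLe p m then some (p, t) else some (m, p :: r)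

-- termination measure for the while-loop below (cited by its decreasing_by)
theorem obwPopMin_length : ∀ {h : List (Int × Int)} {m r},
    obwPopMin h = some (m, r) → r.length < h.length := by
  intro h
  induction h with
  | nil => intro m r hmr; simp [obwPopMin] at hmr
  | cons p t ih =>
    intro m r hmr
    simp only [obwPopMin] at hmr
    rcases ht : obwPopMin t with _ | ⟨m', r'⟩
    · rw [ht] at hmr; simp at hmr; rw [hmr.2]; simp
    · rw [ht] at hmr
      by_cases hle : obwPairLe p m'
      · simp [hle] at hmr; rw [← hmr.2]; simp
      · simp [hle] at hmr
        have := ih ht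
        rw [← hmr.2]; simp; omega

-- the `while heap and sumOfA < totalSum` loop
def obwLoopA (heap : List (Int × Int)) (totalSum sumOfA : Int)
    (a removedIndex : List Int) : List Int × List Int :=
  if sumOfA < totalSum then
    match hpop : obwPopMin heap with
    | none => (a, removedIndex)
    | some (p, rest) =>
      obwLoopA rest (totalSum - |p.1|) (sumOfA + |p.1|) (a ++ [|p.1|]) (removedIndex ++ [p.2])
  else (a, removedIndex)
  termination_by heap.length
  decreasing_by exact obwPopMin_length hpop

-- Python dict equality (`Counter.__eq__`): same key/value pairs, order-insensitive.
def obwDictEq (d1 d2 : PySem.Dict Int Int) : Bool :=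
  d1.items.all (fun p => d2.get? p.1 == some p.2) &&
  d2.items.all (fun p => d1.get? p.1 == some p.2)

def optimizing_box_weights (arr : List Int) : List Int :=
  let totalSum := arr.sum
  -- for index, num in enumerate(arr): heappush(heap, (-num, index))
  let heap := (PySem.List.enumerate arr).foldl (fun h p => h ++ [(-p.2, p.1)]) []
  let res := obwLoopA heap totalSum 0 [] []
  let a := res.1
  let removedIndex := res.2
  -- for i in range(len(arr)): if i not in removedIndex: b.append(arr[i])
  -- (arr[i] with 0 ≤ i < len(arr): pyGetD's default is never used)
  let b := (PySem.List.pyRange 0 arr.length).foldl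
    (fun acc i => if removedIndex.contains i then acc else acc ++ [PySem.List.pyGetD arr i 0]) []
  let mapping := PySem.Dict.counter b
  -- for item in a: if item in mapping: isIntersection = True; break
  let isIntersection := a.any (fun item => mapping.contains item)
  let newArr := a ++ b
  let isUnion := obwDictEq (PySem.Dict.counter newArr) (PySem.Dict.counter arr)
  if isUnion && !isIntersection then a else []

-- ===== PORT B =====
-- for v in s: if pref >= total - pref: break; pref += v; k += 1   (returns k)
def obwSplitLoop : List Int → Int → Int → Int → Int
  | [], _, _, k => k
  | v :: t, total, pref, k =>
    if pref ≥ total - pref then k else obwSplitLoop t total (pref + v) (k + 1)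

def optimizing_box_weights_alt (arr : List Int) : List Int :=
  let s := PySem.List.sorted arr (fun x => x) true
  let total := s.sum
  let k := obwSplitLoop s total 0 0
  -- 0 < k < len(s) guards the two indexings, so pyGetD's default is never used
  if 0 < k ∧ k < (s.length : Int) ∧ PySem.List.pyGetD s (k - 1) 0 = PySem.List.pyGetD s k 0 then
    []
  else
    PySem.List.slice s none (some k)

-- ===== PRECONDITION & SPEC =====
def Spec_optimizing_box_weights (arr : List Int) (out : List Int) : Prop := out = optimizing_box_weights_alt arr
instance (arr : List Int) (out : List Int) : Decidable (Spec_optimizing_box_weights arr out) := by unfold Spec_optimizing_box_weights; infer_instance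

-- ===== CLAIM (what is proved, stated in full; the proofs are below) =====
def Claim_equal_optimizing_box_weights : Prop := ∀ (arr : List Int), Dom_optimizing_box_weights arr → Spec_optimizing_box_weights arr (optimizing_box_weights arr)

-- ===== LEMMAS AND PROOFS =====

-- the heap pairs, in push order
def obwPairs (arr : List Int) : List (Int × Int) :=
  (PySem.List.enumerate arr).map (fun p => (-p.2, p.1))

-- the heap drained in pop order = the pairs sorted by the lexicographic order
def obwSortLex (h : List (Int × Int)) : List (Int × Int) := h.mergeSort obwPairLe

-- structural version of A's while-loop, walking the lex-sorted pair list
def obwLoopS : List (Int × Int) → Int → Int → List Int → List Int → List Int × List Int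
  | [], _, _, a, rem => (a, rem)
  | p :: t, tot, sum, a, rem =>
    if sum < tot then obwLoopS t (tot - |p.1|) (sum + |p.1|) (a ++ [|p.1|]) (rem ++ [p.2])
    else (a, rem)

-- Nat-valued count of elements B's scan consumes
def obwKB : List Int → Int → Int → Nat
  | [], _, _ => 0
  | v :: t, total, pref => if pref ≥ total - pref then 0 else obwKB t total (pref + v) + 1

theorem obwPairLe_trans {a b c : Int × Int} (h1 : obwPairLe a b = true)
    (h2 : obwPairLe b c = true) : obwPairLe a c = true := by
  simp only [obwPairLe, Bool.or_eq_true, decide_eq_true_eq, Bool.and_eq_true, beq_iff_eq] at *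
  omega

theorem obwPairLe_total (a b : Int × Int) : (obwPairLe a b || obwPairLe b a) = true := by
  simp only [obwPairLe, Bool.or_eq_true, decide_eq_true_eq, Bool.and_eq_true, beq_iff_eq]
  omega

theorem obwPairLe_antisymm {a b : Int × Int} (h1 : obwPairLe a b = true)
    (h2 : obwPairLe b a = true) : a = b := by
  obtain ⟨a1, a2⟩ := a; obtain ⟨b1, b2⟩ := b
  simp only [obwPairLe, Bool.or_eq_true, decide_eq_true_eq, Bool.and_eq_true, beq_iff_eq] at *
  have : a1 = b1 ∧ a2 = b2 := by omega
  simp [this.1, this.2]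

theorem obwPopMin_eq_none {h : List (Int × Int)} (hn : obwPopMin h = none) : h = [] := by
  cases h with
  | nil => rfl
  | cons p t =>
    exfalso; simp only [obwPopMin] at hn
    rcases ht : obwPopMin t with _ | ⟨m, r⟩ <;> rw [ht] at hn <;> simp at hn
    by_cases hle : obwPairLe p m <;> simp [hle] at hn

theorem obwPopMin_perm : ∀ {h : List (Int × Int)} {m r},
    obwPopMin h = some (m, r) → h.Perm (m :: r) := by
  intro h
  induction h with
  | nil => intro m r hmr; simp [obwPopMin] at hmr
  | cons p t ih =>
    intro m r hmr
    simp only [obwPopMin] at hmr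
    rcases ht : obwPopMin t with _ | ⟨m', r'⟩ <;> rw [ht] at hmr
    · simp at hmr
      rw [hmr.1, hmr.2, obwPopMin_eq_none ht]
    · by_cases hle : obwPairLe p m'
      · simp [hle] at hmr
        rw [hmr.1.symm, ← hmr.2]
      · simp [hle] at hmr
        have hperm := ih ht
        rw [← hmr.1, ← hmr.2]
        exact (hperm.cons p).trans (List.Perm.swap m' p r')

theorem obwPopMin_min : ∀ {h : List (Int × Int)} {m r},
    obwPopMin h = some (m, r) → ∀ x ∈ h, obwPairLe m x = true := by
  intro h
  induction h with
  | nil => intro m r hmr; simp [obwPopMin] at hmr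
  | cons p t ih =>
    intro m r hmr x hx
    simp only [obwPopMin] at hmr
    have hrefl : ∀ y : Int × Int, obwPairLe y y = true := by
      intro y; simp [obwPairLe]
    rcases ht : obwPopMin t with _ | ⟨m', r'⟩ <;> rw [ht] at hmr
    · simp at hmr
      have : t = [] := obwPopMin_eq_none ht
      subst this
      simp at hx
      rw [hmr.1.symm, hx]; exact hrefl _
    · by_cases hle : obwPairLe p m'
      · simp [hle] at hmr
        rw [← hmr.1]
        rcases List.mem_cons.mp hx with h1 | h2
        · rw [h1]; exact hrefl _
        · exact obwPairLe_trans hle (ih ht x h2)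
      · simp [hle] at hmr
        rw [← hmr.1]
        rcases List.mem_cons.mp hx with h1 | h2
        · rw [h1]
          rcases Bool.or_eq_true _ _ |>.mp (obwPairLe_total p m') with h | h
          · exact absurd h hle
          · exact h
        · exact ih ht x h2

theorem obwSortLex_pairwise (h : List (Int × Int)) :
    List.Pairwise (fun a b => obwPairLe a b = true) (obwSortLex h) := by
  unfold obwSortLex
  exact List.pairwise_mergeSort (le := obwPairLe) (fun a b c h1 h2 => obwPairLe_trans h1 h2) obwPairLe_total h

theorem obwSortLex_cons {h : List (Int × Int)} {m r}
    (hpop : obwPopMin h = some (m, r)) : obwSortLex h = m :: obwSortLex r := by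
  have hperm : (obwSortLex h).Perm (m :: obwSortLex r) :=
    ((List.mergeSort_perm h obwPairLe).trans (obwPopMin_perm hpop)).trans
      ((List.mergeSort_perm r obwPairLe).symm.cons m)
  have hp1 : List.Pairwise (fun a b => obwPairLe a b = true) (obwSortLex h) :=
    obwSortLex_pairwise h
  have hp2 : List.Pairwise (fun a b => obwPairLe a b = true) (m :: obwSortLex r) := by
    refine List.pairwise_cons.mpr ⟨?_, obwSortLex_pairwise r⟩
    intro x hx
    exact obwPopMin_min hpop x ((obwPopMin_perm hpop).symm.subset
      (List.mem_cons_of_mem m ((List.mergeSort_perm r obwPairLe).subset hx)))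
  exact List.Perm.eq_of_pairwise (fun a b _ _ h1 h2 => obwPairLe_antisymm h1 h2) hp1 hp2 hperm

theorem obwLoopA_eq_S_aux : ∀ (n : Nat) (h : List (Int × Int)), h.length ≤ n →
    ∀ (tot sum : Int) (a rem : List Int),
    obwLoopA h tot sum a rem = obwLoopS (obwSortLex h) tot sum a rem := by
  intro n
  induction n with
  | zero =>
    intro h hl tot sum a rem
    have : h = [] := List.length_eq_zero_iff.mp (Nat.le_zero.mp hl)
    subst this
    rw [obwLoopA]
    simp [obwPopMin, obwSortLex, obwLoopS]
  | succ n ih =>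
    intro h hl tot sum a rem
    rw [obwLoopA]
    rcases hpop : obwPopMin h with _ | ⟨p, rest⟩
    · have : h = [] := obwPopMin_eq_none hpop
      subst this
      simp [obwSortLex, obwLoopS]
    · rw [obwSortLex_cons hpop]
      by_cases hc : sum < tot
      · simp only [hc, if_true, obwLoopS]
        exact ih rest (by have := obwPopMin_length hpop; omega) _ _ _ _
      · simp [hc, obwLoopS]

theorem obwLoopA_eq_S (h : List (Int × Int)) : ∀ (tot sum : Int) (a rem : List Int),
    obwLoopA h tot sum a rem = obwLoopS (obwSortLex h) tot sum a rem :=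
  obwLoopA_eq_S_aux h.length h (le_refl _)

theorem obwLoopS_spec : ∀ (sp : List (Int × Int)) (tot sum : Int) (a rem : List Int),
    List.Pairwise (fun p q : Int × Int => -q.1 ≤ -p.1) sp → 0 ≤ sum →
    tot = (sp.map (fun p => -p.1)).sum →
    obwLoopS sp tot sum a rem =
      (a ++ ((sp.take (obwKB (sp.map (fun p => -p.1)) (sum + tot) sum)).map (fun p => -p.1)),
       rem ++ ((sp.take (obwKB (sp.map (fun p => -p.1)) (sum + tot) sum)).map (fun p => p.2))) := by
  intro sp
  induction sp with
  | nil => intro tot sum a rem _ _ _; simp [obwLoopS, obwKB]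
  | cons p t ih =>
    intro tot sum a rem hpw hsum htot
    simp only [List.map_cons, obwKB, obwLoopS]
    by_cases hc : sum < tot
    · have hcond : ¬ (sum ≥ sum + tot - sum) := by omega
      have hv : 0 ≤ -p.1 := by
        by_contra hneg
        rw [not_le] at hneg
        have hall : ∀ q ∈ t, -q.1 ≤ -p.1 := (List.pairwise_cons.mp hpw).1
        have hts : (t.map (fun p => -p.1)).sum ≤ 0 := by
          have h0 : 0 ≤ (t.map (fun p : Int × Int => p.1)).sum := by
            apply List.sum_nonneg
            intro x hx
            obtain ⟨q, hq, rfl⟩ := List.mem_map.mp hx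
            have := hall q hq; omega
          have h1 : (t.map (fun p : Int × Int => -p.1)).sum
              = -(t.map (fun p : Int × Int => p.1)).sum := by
            rw [List.sum_neg, List.map_map]; rfl
          omega
        rw [List.map_cons, List.sum_cons] at htot
        omega
      have habs : |p.1| = -p.1 := abs_of_nonpos (by omega)
      rw [List.map_cons, List.sum_cons] at htot
      have := ih (tot - -p.1) (sum + -p.1) (a ++ [|p.1|]) (rem ++ [p.2])
        (List.pairwise_cons.mp hpw).2 (by omega) (by omega)
      simp only [hc, if_true, hcond, if_false, habs] at *
      rw [this]
      have harith : sum + -p.1 + (tot - -p.1) = sum + tot := by ring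
      rw [harith]
      simp [List.take_succ_cons]
    · have hcond : (sum ≥ sum + tot - sum) := by omega
      simp [hc]

theorem obwKB_le_length (s : List Int) : ∀ (total pref : Int), obwKB s total pref ≤ s.length := by
  induction s with
  | nil => intro _ _; simp [obwKB]
  | cons v t ih =>
    intro total pref
    simp only [obwKB]
    split_ifs
    · simp
    · have := ih total (pref + v)
      simp; omega

theorem obwSplitLoop_eq (s : List Int) : ∀ (total pref k : Int),
    obwSplitLoop s total pref k = k + (obwKB s total pref : Int) := by
  induction s with
  | nil => intro _ _ _; simp [obwSplitLoop, obwKB]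
  | cons v t ih =>
    intro total pref k
    simp only [obwSplitLoop, obwKB]
    split_ifs
    · simp
    · rw [ih]
      push_cast
      ring

-- boundary-duplicate characterisation of "some taken value also occurs among the rest"
theorem obwBoundary (s : List Int) (k : Nat) (hk : k ≤ s.length)
    (hs : List.Pairwise (fun a b : Int => b ≤ a) s) :
    ((s.take k).any (fun x => (s.drop k).contains x) = true) ↔
      (0 < k ∧ k < s.length ∧ s.getD (k - 1) 0 = s.getD k 0) := by
  have hmono : ∀ (i j : Nat) (hi : i < s.length) (hj : j < s.length), i ≤ j → s[j] ≤ s[i] := by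
    intro i j hi hj hij
    rcases Nat.lt_or_ge i j with h | h
    · exact (List.pairwise_iff_getElem.mp hs) i j hi hj h
    · have : i = j := by omega
      subst this; exact le_refl _
  rw [List.any_eq_true]
  constructor
  · rintro ⟨x, hxt, hxd⟩
    have hxd' : x ∈ s.drop k := List.contains_iff_mem.mp hxd
    obtain ⟨i, hi, hsi⟩ := List.mem_iff_getElem.mp hxt
    obtain ⟨j, hj, hsj⟩ := List.mem_iff_getElem.mp hxd'
    have hitk : i < k := by
      have := hi; rw [List.length_take] at this; omega
    have hjlen : k + j < s.length := by
      have := hj; rw [List.length_drop] at this; omega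
    have hilen : i < s.length := by omega
    have hklen : k < s.length := by omega
    have hk1len : k - 1 < s.length := by omega
    rw [List.getElem_take] at hsi
    rw [List.getElem_drop] at hsj
    refine ⟨by omega, hklen, ?_⟩
    have h1 : s[k - 1] ≤ s[i] := hmono i (k - 1) hilen hk1len (by omega)
    have h2 : s[k] ≤ s[k - 1] := hmono (k - 1) k hk1len hklen (by omega)
    have h3 : s[k + j] ≤ s[k] := hmono k (k + j) hklen hjlen (by omega)
    rw [List.getD_eq_getElem s 0 hk1len, List.getD_eq_getElem s 0 hklen]
    have hxx : s[i] = s[k + j] := by rw [hsi, hsj]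
    omega
  · rintro ⟨hk0, hklen, heq⟩
    have hk1len : k - 1 < s.length := by omega
    rw [List.getD_eq_getElem s 0 hk1len, List.getD_eq_getElem s 0 hklen] at heq
    refine ⟨s[k - 1], ?_, ?_⟩
    · rw [List.mem_iff_getElem]
      refine ⟨k - 1, by rw [List.length_take]; omega, ?_⟩
      rw [List.getElem_take]
    · rw [List.contains_iff_mem, heq, List.mem_iff_getElem]
      refine ⟨0, by rw [List.length_drop]; omega, ?_⟩
      rw [List.getElem_drop]
      simp

-- Python dict equality of two counters of permuted lists
theorem obwDictEq_counter_half {xs ys : List Int} (hperm : xs.Perm ys) :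
    ∀ p ∈ (PySem.Dict.counter xs).items,
      ((PySem.Dict.counter ys).get? p.1 == some p.2) = true := by
  intro p hp
  rw [PySem.Dict.items_counter] at hp
  obtain ⟨k, hk, rfl⟩ := List.mem_map.mp hp
  have hkxs : k ∈ xs := (PySem.Set.mem_ofList xs k).mp hk
  have hkys : k ∈ ys := hperm.subset hkxs
  have hcnt : List.count k xs = List.count k ys := hperm.count_eq k
  rw [beq_iff_eq]
  rw [PySem.Dict.get?_eq_some_iff_mem_items _ _ _ (PySem.Dict.nodup_keys_counter ys)]
  rw [PySem.Dict.items_counter]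
  rw [List.mem_map]
  exact ⟨k, (PySem.Set.mem_ofList ys k).mpr hkys, by rw [hcnt]⟩

theorem obwDictEq_counter {xs ys : List Int} (hperm : xs.Perm ys) :
    obwDictEq (PySem.Dict.counter xs) (PySem.Dict.counter ys) = true := by
  unfold obwDictEq
  rw [Bool.and_eq_true, List.all_eq_true, List.all_eq_true]
  exact ⟨obwDictEq_counter_half hperm, obwDictEq_counter_half hperm.symm⟩

-- the b-building loop, computed
theorem obw_b_eq (arr removed : List Int) :
    (PySem.List.pyRange 0 arr.length).foldl
      (fun acc i => if removed.contains i then acc else acc ++ [PySem.List.pyGetD arr i 0]) []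
    = ((obwPairs arr).filter (fun p => !removed.contains p.2)).map (fun p => -p.1) := by
  have aux : ∀ (t : List Int) (j : Nat) (acc : List Int), arr.drop j = t →
      (PySem.List.pyRange (j : Int) (arr.length : Int)).foldl
        (fun acc i => if removed.contains i then acc
          else acc ++ [PySem.List.pyGetD arr i 0]) acc
      = acc ++ ((t.zipIdx j).filter (fun p => !removed.contains (p.2 : Int))).map
          (fun p => p.1) := by
    intro t
    induction t with
    | nil =>
      intro j acc hdrop
      have hj : arr.length ≤ j := List.drop_eq_nil_iff.mp hdrop
      have hnil : PySem.List.pyRange (j : Int) (arr.length : Int) = [] := by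
        simp [PySem.List.pyRange]; omega
      simp [hnil]
    | cons x t' ih =>
      intro j acc hdrop
      have hj : j < arr.length := by
        by_contra hge
        rw [List.drop_eq_nil_iff.mpr (by omega)] at hdrop
        simp at hdrop
      have hx : arr[j] = x ∧ arr.drop (j + 1) = t' := by
        have := List.getElem_cons_drop hj
        rw [hdrop] at this
        exact ⟨(List.cons.inj this.symm).1.symm, (List.cons.inj this.symm).2.symm⟩
      rw [PySem.List.pyRange_one_cons (by exact_mod_cast hj), List.foldl_cons]
      have hget : PySem.List.pyGetD arr (j : Int) 0 = x := by
        rw [PySem.List.pyGetD_natCast, List.getD_eq_getElem arr 0 hj, hx.1]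
      have hcast : ((j : Int) + 1) = ((j + 1 : Nat) : Int) := by push_cast; ring
      rw [hget, hcast]
      rw [List.zipIdx_cons, List.filter_cons]
      by_cases hc : removed.contains (j : Int) = true
      · have hstep := ih (j + 1) acc hx.2
        simp only [hc, if_true, Bool.not_true, Bool.false_eq_true, if_false]
        exact hstep
      · have hcf : removed.contains (j : Int) = false := by simpa using hc
        have hstep := ih (j + 1) (acc ++ [x]) hx.2
        simp only [hcf, Bool.false_eq_true, if_false, Bool.not_false, if_true, List.map_cons]
        rw [hstep]
        simp
  have hmain := aux arr 0 [] (by simp)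
  rw [Int.natCast_zero] at hmain
  rw [hmain]
  unfold obwPairs
  rw [PySem.List.enumerate_eq_zipIdx_map arr 0, List.map_map, List.filter_map, List.map_map]
  simp [Function.comp_def]

theorem obw_filter_drop (rp : List (Int × Int)) (k : Nat)
    (hnd : (rp.map (fun p => p.2)).Nodup) :
    rp.filter (fun p => !((rp.take k).map (fun p => p.2)).contains p.2) = rp.drop k := by
  have hsplit : rp = rp.take k ++ rp.drop k := (List.take_append_drop k rp).symm
  have hdisj : ∀ a ∈ (rp.take k).map (fun p : Int × Int => p.2),
      ∀ b ∈ (rp.drop k).map (fun p : Int × Int => p.2), a ≠ b := by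
    have : ((rp.take k).map (fun p : Int × Int => p.2)
        ++ (rp.drop k).map (fun p : Int × Int => p.2)).Nodup := by
      rw [← List.map_append, ← hsplit]; exact hnd
    exact (List.nodup_append.mp this).2.2
  set q : Int × Int → Bool := fun p => !((rp.take k).map (fun p : Int × Int => p.2)).contains p.2 with hq
  have hre : rp.filter q = (rp.take k).filter q ++ (rp.drop k).filter q := by
    conv_lhs => rw [← List.take_append_drop k rp]
    rw [List.filter_append]
  rw [hre]
  have h1 : (rp.take k).filter q = [] := by
    rw [List.filter_eq_nil_iff]
    intro p hp
    rw [hq]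
    simp only [Bool.not_eq_true', Bool.not_eq_false]
    exact List.contains_iff_mem.mpr (List.mem_map_of_mem hp)
  have h2 : (rp.drop k).filter q = rp.drop k := by
    rw [List.filter_eq_self]
    intro p hp
    rw [hq]
    simp only [Bool.not_eq_true']
    rw [← Bool.not_eq_true, List.contains_iff_mem] at *
    intro hmem
    exact hdisj p.2 hmem p.2 (List.mem_map_of_mem hp) rfl
  rw [h1, h2, List.nil_append]

theorem obwPairs_snd_nodup (arr : List Int) :
    ((obwPairs arr).map (fun p => p.2)).Nodup := by
  unfold obwPairs
  rw [PySem.List.enumerate_eq_map_pyRange arr 0, List.map_map, List.map_map]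
  have hcomp : ((((fun p : Int × Int => p.2) ∘ fun p : Int × Int => (-p.2, p.1)) ∘
      fun j => (j, PySem.List.pyGetD arr j 0)) : Int → Int) = fun j => j := rfl
  rw [hcomp]
  apply List.Nodup.map (fun a b h => h)
  have hlen : PySem.List.len arr = (arr.length : Int) := by simp [PySem.List.len]
  rw [hlen, PySem.List.pyRange_zero_natCast]
  exact List.Nodup.map (fun a b h => by exact_mod_cast h) (List.nodup_range)

theorem obwPairs_val_map (arr : List Int) :
    (obwPairs arr).map (fun p => -p.1) = arr := by
  unfold obwPairs
  rw [PySem.List.enumerate_eq_zipIdx_map, List.map_map, List.map_map]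
  have hcomp : ((((fun p : Int × Int => -p.1) ∘ fun p : Int × Int => (-p.2, p.1)) ∘
      fun p : Int × Nat => ((0 : Int) + (p.2 : Int), p.1)) : Int × Nat → Int)
      = fun p : Int × Nat => p.1 := by
    funext p; simp
  rw [hcomp]
  simp

theorem obwPairLe_val {p q : Int × Int} (h : obwPairLe p q = true) : -q.1 ≤ -p.1 := by
  simp only [obwPairLe, Bool.or_eq_true, decide_eq_true_eq, Bool.and_eq_true, beq_iff_eq] at h
  omega

theorem obwSortLex_val_perm (arr : List Int) :
    ((obwSortLex (obwPairs arr)).map (fun p => -p.1)).Perm arr := by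
  have := (List.mergeSort_perm (obwPairs arr) obwPairLe).map (fun p : Int × Int => -p.1)
  rw [obwPairs_val_map] at this
  exact this

theorem obwSorted_eq (arr : List Int) :
    PySem.List.sorted arr (fun x => x) true = (obwSortLex (obwPairs arr)).map (fun p => -p.1) := by
  apply List.Perm.eq_of_pairwise (le := fun a b : Int => b ≤ a)
  · intro a b _ _ h1 h2; omega
  · exact PySem.List.sorted_pairwise_rev arr (fun x => x)
  · exact List.Pairwise.map _ (fun a b hab => obwPairLe_val hab) (obwSortLex_pairwise (obwPairs arr))
  · exact (PySem.List.sorted_perm arr _ true).trans (obwSortLex_val_perm arr).symm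

-- proof-side abbreviations for A's intermediate data
def obwS (arr : List Int) : List Int := (obwSortLex (obwPairs arr)).map (fun p => -p.1)

def obwK (arr : List Int) : Nat := obwKB (obwS arr) (0 + arr.sum) 0

theorem obwA_eq (arr : List Int) :
    optimizing_box_weights arr =
      if ((obwS arr).take (obwK arr)).any
          (fun x => ((obwS arr).drop (obwK arr)).contains x)
      then [] else (obwS arr).take (obwK arr) := by
  unfold obwS obwK obwS
  simp only [optimizing_box_weights]
  rw [PySem.List.foldl_append_singleton_eq_map]
  rw [List.nil_append]
  have hpairs : (PySem.List.enumerate arr).map (fun p => (-p.2, p.1)) = obwPairs arr := rfl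
  rw [hpairs]
  have hpw : List.Pairwise (fun p q : Int × Int => -q.1 ≤ -p.1) (obwSortLex (obwPairs arr)) :=
    (obwSortLex_pairwise (obwPairs arr)).imp (fun h => obwPairLe_val h)
  have htot : arr.sum = ((obwSortLex (obwPairs arr)).map (fun p => -p.1)).sum :=
    ((obwSortLex_val_perm arr).sum_eq).symm
  have hloop : obwLoopA (obwPairs arr) arr.sum 0 [] [] =
      (((obwSortLex (obwPairs arr)).take
          (obwKB ((obwSortLex (obwPairs arr)).map (fun p => -p.1)) (0 + arr.sum) 0)).map
        (fun p => -p.1),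
       ((obwSortLex (obwPairs arr)).take
          (obwKB ((obwSortLex (obwPairs arr)).map (fun p => -p.1)) (0 + arr.sum) 0)).map
        (fun p => p.2)) := by
    rw [obwLoopA_eq_S]
    rw [obwLoopS_spec (obwSortLex (obwPairs arr)) arr.sum 0 [] [] hpw (le_refl 0) htot]
    simp
  rw [hloop]
  dsimp only
  set rp := obwSortLex (obwPairs arr) with hrp
  set K := obwKB (List.map (fun p => -p.1) rp) (0 + arr.sum) 0 with hKdef
  set removed := List.map (fun p => p.2) (List.take K rp) with hremdef
  rw [obw_b_eq arr removed]
  set B := ((obwPairs arr).filter (fun p => !removed.contains p.2)).map (fun p => -p.1) with hBdef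
  have hperm_rp : rp.Perm (obwPairs arr) := by
    rw [hrp]; unfold obwSortLex; exact List.mergeSort_perm _ _
  have hnd : (rp.map (fun p => p.2)).Nodup :=
    ((hperm_rp.map (fun p : Int × Int => p.2)).symm).nodup (obwPairs_snd_nodup arr)
  have h2 : rp.filter (fun p => !removed.contains p.2) = rp.drop K := by
    rw [hremdef]; exact obw_filter_drop rp K hnd
  have hbperm : B.Perm ((rp.drop K).map (fun p => -p.1)) := by
    rw [hBdef]
    have hf : ((obwPairs arr).filter (fun p => !removed.contains p.2)).Perm (List.drop K rp) := by
      have hff := List.Perm.filter (fun p : Int × Int => !removed.contains p.2) hperm_rp.symm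
      rw [h2] at hff
      exact hff
    exact hf.map _
  have hcont : ∀ x : Int, B.contains x = ((List.map (fun p => -p.1) rp).drop K).contains x := by
    intro x
    apply Bool.eq_iff_iff.mpr
    rw [List.contains_iff_mem, List.contains_iff_mem, ← List.map_drop]
    exact hbperm.mem_iff
  simp only [PySem.Dict.contains_counter]
  simp only [hcont]
  have hAB : (((rp.take K).map (fun p => -p.1)) ++ B).Perm arr := by
    have ha1 : (((rp.take K).map (fun p => -p.1)) ++ B).Perm
        (((rp.take K).map (fun p => -p.1)) ++ ((rp.drop K).map (fun p => -p.1))) :=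
      List.Perm.append_left _ hbperm
    have ha2 : ((rp.take K).map (fun p => -p.1)) ++ ((rp.drop K).map (fun p => -p.1))
        = rp.map (fun p => -p.1) := by
      rw [← List.map_append, List.take_append_drop]
    rw [ha2] at ha1
    exact ha1.trans (obwSortLex_val_perm arr)
  rw [obwDictEq_counter hAB]
  simp only [Bool.true_and, List.map_take]
  by_cases hc : ((List.take K (List.map (fun p => -p.1) rp)).any
      (fun x => (List.drop K (List.map (fun p => -p.1) rp)).contains x)) = true
  · rw [if_pos hc, hc]
    simp
  · have hcf : ((List.take K (List.map (fun p => -p.1) rp)).any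
        (fun x => (List.drop K (List.map (fun p => -p.1) rp)).contains x)) = false := by
      simpa using hc
    rw [if_neg hc, hcf]
    simp

theorem obwB_eq (arr : List Int) :
    optimizing_box_weights_alt arr =
      if 0 < obwK arr ∧ obwK arr < (obwS arr).length ∧
          (obwS arr).getD (obwK arr - 1) 0 = (obwS arr).getD (obwK arr) 0
      then [] else (obwS arr).take (obwK arr) := by
  unfold obwS obwK obwS
  simp only [optimizing_box_weights_alt]
  rw [obwSorted_eq arr]
  rw [obwSplitLoop_eq]
  have hsum : ((obwSortLex (obwPairs arr)).map (fun p => -p.1)).sum = arr.sum :=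
    (obwSortLex_val_perm arr).sum_eq
  rw [hsum]
  simp only [zero_add]
  set s := (obwSortLex (obwPairs arr)).map (fun p => -p.1) with hsdef
  set K := obwKB s arr.sum 0 with hKdef
  by_cases hD : 0 < K ∧ K < s.length ∧ s.getD (K - 1) 0 = s.getD K 0
  · have h1 : ((K : Int) - 1) = ((K - 1 : Nat) : Int) := by
      have := hD.1; omega
    rw [h1, PySem.List.pyGetD_natCast, PySem.List.pyGetD_natCast]
    rw [if_pos ⟨by exact_mod_cast hD.1, by exact_mod_cast hD.2.1, hD.2.2⟩, if_pos hD]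
  · rw [if_neg, if_neg hD]
    · have hsl := PySem.List.slice_to s (b := (K : Int)) (Int.natCast_nonneg K)
      rw [hsl, Int.toNat_natCast]
    · rintro ⟨h1, h2, h3⟩
      have hk0 : 0 < K := by exact_mod_cast h1
      rw [show ((K : Int) - 1) = ((K - 1 : Nat) : Int) by omega,
        PySem.List.pyGetD_natCast, PySem.List.pyGetD_natCast] at h3
      exact hD ⟨hk0, by exact_mod_cast h2, h3⟩

theorem obwMain (arr : List Int) :
    optimizing_box_weights arr = optimizing_box_weights_alt arr := by
  rw [obwA_eq, obwB_eq]
  have hs : List.Pairwise (fun a b : Int => b ≤ a) (obwS arr) :=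
    List.Pairwise.map _ (fun a b h => obwPairLe_val h) (obwSortLex_pairwise (obwPairs arr))
  have hkle : obwK arr ≤ (obwS arr).length := obwKB_le_length _ _ _
  by_cases hD : 0 < obwK arr ∧ obwK arr < (obwS arr).length ∧
      (obwS arr).getD (obwK arr - 1) 0 = (obwS arr).getD (obwK arr) 0
  · rw [if_pos ((obwBoundary (obwS arr) (obwK arr) hkle hs).mpr hD), if_pos hD]
  · rw [if_neg (fun h => hD ((obwBoundary (obwS arr) (obwK arr) hkle hs).mp h)), if_neg hD]

-- ===== VERDICT (by name: the statement is the Claim_ definition above) =====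
theorem optimizing_box_weights_spec : Claim_equal_optimizing_box_weights := by
  intro arr _
  unfold Spec_optimizing_box_weights
  exact obwMain arr
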